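-- pv_equiv track=rewrite | github.com/autch/piece-emu | src/tests/bare_metal/gen/gen_shift.py | scan1_op
-- ===== SOURCE A (Python) =====
-- PSR_N = 1 << 0
--
-- PSR_Z = 1 << 1
--
-- PSR_C = 1 << 3
--
-- MASK = 0xFFFFFFFF
--
-- SIGN_BIT = 0x80000000
--
-- def nz_flags(result: int) -> int:
--     f = 0
--     if result & SIGN_BIT: f |= PSR_N
--     if (result & MASK) == 0: f |= PSR_Z
--     return f
--
-- def scan1_op(rs: int) -> tuple[int, int]:
--     rs &= MASK
--     upper = (rs >> 24) & 0xFF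
--     for i in range(8):
--         if upper & (1 << (7 - i)):
--             r = i
--             f = nz_flags(r) & PSR_Z
--             return r, f
--     return 8, PSR_C
-- ===== SOURCE B (Python) =====
-- PSR_N = 1 << 0
--
-- PSR_Z = 1 << 1
--
-- PSR_C = 1 << 3
--
-- MASK = 0xFFFFFFFF
--
-- def scan1_op(rs: int) -> tuple[int, int]:
--     rs &= MASK
--     upper = (rs >> 24) & 0xFF
--     if upper == 0:
--         return 8, PSR_C
--     r = 8 - upper.bit_length()
--     return r, (PSR_Z if r == 0 else 0)
-- ===== Notes on version B (the rewrite author's own statement) =====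
-- stated objective: simpler
-- what changed: Replaces the eight-iteration MSB-first scan loop and the general nz_flags helper by a closed-form bit_length computation of the leading-zero count, with the zero flag set directly when the top bit is already set.
import Mathlib
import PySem

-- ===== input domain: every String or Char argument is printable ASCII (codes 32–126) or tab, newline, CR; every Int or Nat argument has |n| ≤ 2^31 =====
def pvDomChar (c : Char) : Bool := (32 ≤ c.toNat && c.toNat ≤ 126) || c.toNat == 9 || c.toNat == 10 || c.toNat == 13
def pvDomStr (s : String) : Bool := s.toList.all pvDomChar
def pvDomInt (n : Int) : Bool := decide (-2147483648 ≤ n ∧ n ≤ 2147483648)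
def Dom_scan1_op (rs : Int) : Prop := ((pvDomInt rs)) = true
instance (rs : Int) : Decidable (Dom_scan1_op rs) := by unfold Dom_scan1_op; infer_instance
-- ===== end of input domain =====

-- B replaces A's 8-step MSB-first scan loop by a closed-form bit_length computation (objective: simpler).

-- ===== PORT A =====
-- helper of A: nz_flags(result)
def nz_flags (result : Int) : Int :=
  let f : Int := 0
  let f := if PySem.Int.band result 0x80000000 ≠ 0 then PySem.Int.bor f 1 else f
  let f := if PySem.Int.band result 0xFFFFFFFF = 0 then PySem.Int.bor f 2 else f
  f

-- A's 'for i in range(8)' loop with early return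
def scan1_loop (upper : Int) : List Int → Int × Int
  | [] => (8, 8)
  | i :: rest =>
    if PySem.Int.band upper (1 <<< (7 - i).toNat) ≠ 0 then
      (i, PySem.Int.band (nz_flags i) 2)
    else scan1_loop upper rest

def scan1_op (rs : Int) : Int × Int :=
  let rs := PySem.Int.band rs 0xFFFFFFFF
  let upper := PySem.Int.band (rs >>> (24:Nat)) 0xFF
  scan1_loop upper (PySem.List.pyRange 0 8 1)

-- ===== PORT B =====
def scan1_op_alt (rs : Int) : Int × Int :=
  let rs := PySem.Int.band rs 0xFFFFFFFF
  let upper := PySem.Int.band (rs >>> (24:Nat)) 0xFF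
  if upper = 0 then (8, 8)
  else
    let r : Int := 8 - PySem.Int.bitLength upper
    (r, if r = 0 then 2 else 0)

-- ===== PRECONDITION & SPEC =====
def Spec_scan1_op (rs : Int) (out : Int × Int) : Prop := out = scan1_op_alt rs
instance (rs : Int) (out : Int × Int) : Decidable (Spec_scan1_op rs out) := by unfold Spec_scan1_op; infer_instance

-- ===== CLAIM (what is proved, stated in full; the proofs are below) =====
def Claim_equal_scan1_op : Prop := ∀ (rs : Int), Dom_scan1_op rs → Spec_scan1_op rs (scan1_op rs)

-- ===== LEMMAS AND PROOFS =====

-- the bodies after computing 'upper' agree on every byte value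
theorem scan1_byte : ∀ n : Nat, n < 256 →
    scan1_loop (↑n) (PySem.List.pyRange 0 8 1) =
      (if (n : Int) = 0 then ((8 : Int), (8 : Int))
       else ((8 - (PySem.Int.bitLength ↑n : Int)),
             if (8 - (PySem.Int.bitLength ↑n : Int)) = 0 then (2 : Int) else 0)) := by
  set_option maxRecDepth 4096 in decide

theorem scan1_byte_int (u : Int) (h0 : 0 ≤ u) (h1 : u < 256) :
    scan1_loop u (PySem.List.pyRange 0 8 1) =
      (if u = 0 then ((8 : Int), (8 : Int))
       else ((8 - (PySem.Int.bitLength u : Int)),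
             if (8 - (PySem.Int.bitLength u : Int)) = 0 then (2 : Int) else 0)) := by
  obtain ⟨n, rfl⟩ := Int.eq_ofNat_of_zero_le h0
  exact scan1_byte n (by exact_mod_cast h1)

theorem band_byte_bounds (x : Int) (h : 0 ≤ x) :
    0 ≤ PySem.Int.band x 0xFF ∧ PySem.Int.band x 0xFF < 256 := by
  refine ⟨by rw [PySem.Int.band_comm]; exact PySem.Int.band_nonneg_of_nonneg_left x (by norm_num), ?_⟩
  rw [PySem.Int.band_of_nonneg h (by norm_num)]
  have := Nat.and_le_right (n := x.toNat) (m := (0xFF:Int).toNat)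
  omega

theorem masked_shift_nonneg (rs : Int) : 0 ≤ (PySem.Int.band rs 0xFFFFFFFF) >>> (24:Nat) := by
  rw [Int.shiftRight_eq_div_pow]
  have : 0 ≤ PySem.Int.band rs 0xFFFFFFFF := by
    rw [PySem.Int.band_comm]; exact PySem.Int.band_nonneg_of_nonneg_left rs (by norm_num)
  positivity

-- ===== VERDICT (by name: the statement is the Claim_ definition above) =====
theorem scan1_op_spec : Claim_equal_scan1_op := by
  intro rs _
  unfold Spec_scan1_op
  obtain ⟨h0, h1⟩ := band_byte_bounds ((PySem.Int.band rs 0xFFFFFFFF) >>> (24:Nat)) (masked_shift_nonneg rs)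
  have e1 : scan1_op rs =
      scan1_loop (PySem.Int.band ((PySem.Int.band rs 0xFFFFFFFF) >>> (24:Nat)) 0xFF)
        (PySem.List.pyRange 0 8 1) := rfl
  have e2 : scan1_op_alt rs =
      (if (PySem.Int.band ((PySem.Int.band rs 0xFFFFFFFF) >>> (24:Nat)) 0xFF) = 0
       then ((8 : Int), (8 : Int))
       else ((8 - (PySem.Int.bitLength (PySem.Int.band ((PySem.Int.band rs 0xFFFFFFFF) >>> (24:Nat)) 0xFF) : Int)),
             if (8 - (PySem.Int.bitLength (PySem.Int.band ((PySem.Int.band rs 0xFFFFFFFF) >>> (24:Nat)) 0xFF) : Int)) = 0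
             then (2 : Int) else 0)) := rfl
  rw [e1, e2]
  exact scan1_byte_int _ h0 h1
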